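-- pv_equiv track=rewrite | github.com/JunSeokCheon/self-problem-solving- | implementation/BOJ_4659_S5_비밀번호 발음하기.py | check_three
-- ===== SOURCE A (Python) =====
-- def check_three(password):
--     for i in range(len(password)-1):
--         if (password[i] == password[i+1]):
--             if (password[i] == 'e' or password[i] == 'o'):
--                 continue
--             else:
--                 return False
--     return True
-- ===== SOURCE B (Python) =====
-- def _runs(cs):
--     # run-length encoding, built front-to-back; the run in progress sits at runs[-1]
--     runs = []
--     for ch in cs:
--         if runs and runs[-1][0] == ch:
--             runs[-1] = (ch, runs[-1][1] + 1)
--         else: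
--             runs.append((ch, 1))
--     return runs
--
--
-- def check_three(password):
--     # valid iff every run of identical letters longer than 1 is a run of 'e' or 'o'
--     return all(c in 'eo' for c, k in _runs(password) if k > 1)
-- ===== Notes on version B (the rewrite author's own statement) =====
-- stated objective: alternative
-- what changed: Instead of scanning adjacent index pairs with early return, B first run-length-encodes the password into (char, run-length) pairs and then checks that every run longer than 1 is a run of 'e' or 'o'.
import Mathlib
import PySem

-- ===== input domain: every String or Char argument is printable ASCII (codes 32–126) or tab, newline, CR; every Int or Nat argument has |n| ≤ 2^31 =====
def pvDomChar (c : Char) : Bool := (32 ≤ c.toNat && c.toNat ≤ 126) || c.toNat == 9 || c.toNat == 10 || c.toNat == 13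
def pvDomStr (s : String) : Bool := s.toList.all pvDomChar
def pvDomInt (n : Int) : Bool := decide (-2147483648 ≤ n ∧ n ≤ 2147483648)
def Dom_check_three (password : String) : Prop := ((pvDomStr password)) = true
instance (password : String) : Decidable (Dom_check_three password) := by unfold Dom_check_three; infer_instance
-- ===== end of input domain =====

-- B run-length-encodes the password and checks runs, instead of A's index loop over adjacent pairs (alternative decomposition, same cost).

-- ===== PORT A =====
-- loop over i in range(len(password)-1) with early return False
def check_three_loopA (cs : List Char) : List Int → Bool
  | [] => true
  | i :: rest =>
    match PySem.List.pyGet? cs i, PySem.List.pyGet? cs (i + 1) with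
    | some a, some b =>
      if a == b then
        if a == 'e' || a == 'o' then check_three_loopA cs rest
        else false
      else check_three_loopA cs rest
    | _, _ => check_three_loopA cs rest   -- unreachable: every i in range(len-1) is in bounds

def check_three (password : String) : Bool :=
  check_three_loopA password.toList (PySem.List.pyRange 0 ((password.toList.length : Int) - 1) 1)

-- ===== PORT B =====
-- _runs: run-length encoding built by a left fold; Python appends/updates runs[-1],
-- the port keeps the accumulator REVERSED so runs[-1] is the head (exact same runs).
def check_three_runsStep (acc : List (Char × Nat)) (ch : Char) : List (Char × Nat) :=
  match acc with
  | (c, k) :: rest => if c == ch then (ch, k + 1) :: rest else (ch, 1) :: (c, k) :: rest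
  | [] => [(ch, 1)]

def check_three_runs (cs : List Char) : List (Char × Nat) :=
  (cs.foldl check_three_runsStep []).reverse

-- all(c in 'eo' for c, k in _runs(password) if k > 1)
def check_three_alt (password : String) : Bool :=
  ((check_three_runs password.toList).filter (fun p => decide (1 < p.2))).all
    (fun p => p.1 == 'e' || p.1 == 'o')

-- ===== PRECONDITION & SPEC =====
def Spec_check_three (password : String) (out : Bool) : Prop := out = check_three_alt password
instance (password : String) (out : Bool) : Decidable (Spec_check_three password out) := by unfold Spec_check_three; infer_instance

-- ===== CLAIM (what is proved, stated in full; the proofs are below) =====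
def Claim_equal_check_three : Prop := ∀ (password : String), Dom_check_three password → Spec_check_three password (check_three password)

-- ===== LEMMAS AND PROOFS =====
def pairOkB (p : Char × Char) : Bool := !(p.1 == p.2) || p.1 == 'e' || p.1 == 'o'

def runsCheck (r : List (Char × Nat)) : Bool :=
  (r.filter (fun p => decide (1 < p.2))).all (fun p => p.1 == 'e' || p.1 == 'o')

theorem loopA_eq_pairs : ∀ (t cs : List Char) (j : Nat), cs.drop j = t →
    check_three_loopA cs (PySem.List.pyRange (j : Int) ((cs.length : Int) - 1) 1)
      = (t.zip t.tail).all pairOkB := by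
  intro t
  induction t with
  | nil =>
    intro cs j hdrop
    have hlen : cs.length ≤ j := by
      by_contra h
      push_neg at h
      have := List.length_drop (l := cs) (i := j)
      rw [hdrop] at this
      simp at this
      omega
    rw [PySem.List.pyRange_one_eq_nil (by omega)]
    simp [check_three_loopA]
  | cons a t' ih =>
    intro cs j hdrop
    have hj : j < cs.length := by
      by_contra h
      push_neg at h
      rw [List.drop_eq_nil_of_le h] at hdrop
      simp at hdrop
    have hga : cs[j]? = some a := by
      rw [← List.head?_drop, hdrop]; rfl
    cases t' with
    | nil =>
      have hlen : cs.length = j + 1 := by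
        have := List.length_drop (l := cs) (i := j)
        rw [hdrop] at this
        simp at this
        omega
      rw [PySem.List.pyRange_one_eq_nil (by omega)]
      simp [check_three_loopA]
    | cons b t'' =>
      have hlen2 : j + 1 < cs.length := by
        have := List.length_drop (l := cs) (i := j)
        rw [hdrop] at this
        simp at this
        omega
      have hdrop1 : cs.drop (j + 1) = b :: t'' := by
        rw [← List.tail_drop, hdrop]; rfl
      have hgb : cs[j+1]? = some b := by
        rw [← List.head?_drop, hdrop1]; rfl
      rw [PySem.List.pyRange_one_cons (by push_cast; omega)]
      have hrec := ih cs (j + 1) hdrop1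
      have hga' : PySem.List.pyGet? cs (j : Int) = some a := by
        rw [PySem.List.pyGet?_natCast]; exact hga
      have hgb' : PySem.List.pyGet? cs ((j : Int) + 1) = some b := by
        have : ((j : Int) + 1) = ((j + 1 : Nat) : Int) := by omega
        rw [this, PySem.List.pyGet?_natCast]; exact hgb
      have hcast : ((j : Int) + 1) = ((j + 1 : Nat) : Int) := by omega
      rw [check_three_loopA, hga', hgb', hcast, hrec]
      by_cases hab : a = b
      · subst hab
        by_cases heo : a = 'e' ∨ a = 'o'
        · rcases heo with h | h <;> subst h <;> simp [pairOkB]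
        · push_neg at heo
          simp [pairOkB, heo.1, heo.2]
      · simp [pairOkB, hab]

def allFilterOk (r : List (Char × Nat)) : Bool :=
  (r.filter (fun p => decide (1 < p.2))).all (fun p => p.1 == 'e' || p.1 == 'o')

def okc (c : Char) : Bool := c == 'e' || c == 'o'

theorem foldl_runs_inv : ∀ (cs : List Char) (c : Char) (k : Nat) (rest : List (Char × Nat)),
    1 ≤ k →
    allFilterOk (cs.foldl check_three_runsStep ((c, k) :: rest))
      = ((if 1 < k then okc c else true) && ((c :: cs).zip cs).all pairOkB && allFilterOk rest) := by
  intro cs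
  induction cs with
  | nil =>
    intro c k rest hk
    by_cases h : 1 < k <;> simp [allFilterOk, okc, h]
  | cons ch cs' ih =>
    intro c k rest hk
    by_cases hc : c = ch
    · subst hc
      have hstep : check_three_runsStep ((c, k) :: rest) c = (c, k + 1) :: rest := by
        simp [check_three_runsStep]
      rw [List.foldl_cons, hstep, ih c (k + 1) rest (by omega)]
      have h1 : (1 < k + 1) = True := by simp; omega
      have hz : ((c :: c :: cs').zip (c :: cs')).all pairOkB
          = (okc c && ((c :: cs').zip cs').all pairOkB) := by
        simp [pairOkB, okc, Bool.or_assoc]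
      rw [hz]
      by_cases h : 1 < k
      · cases hoc : okc c <;> simp [h, h1, hoc]
      · simp [h, h1]
    · have hstep : check_three_runsStep ((c, k) :: rest) ch = (ch, 1) :: (c, k) :: rest := by
        simp [check_three_runsStep, hc]
      rw [List.foldl_cons, hstep, ih ch 1 ((c, k) :: rest) (by omega)]
      have hfin : allFilterOk ((c, k) :: rest)
          = ((if 1 < k then okc c else true) && allFilterOk rest) := by
        by_cases h : 1 < k <;> simp [allFilterOk, okc, h]
      have hz : ((c :: ch :: cs').zip (ch :: cs')).all pairOkB
          = ((ch :: cs').zip cs').all pairOkB := by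
        simp [pairOkB, hc]
      rw [hfin, hz]
      by_cases h : 1 < k
      · simp [h]
        cases okc c <;> cases ((ch :: cs').zip cs').all pairOkB <;> simp
      · simp [h]

theorem runsCheck_eq_pairs (cs : List Char) :
    allFilterOk (cs.foldl check_three_runsStep []) = (cs.zip cs.tail).all pairOkB := by
  cases cs with
  | nil => simp [allFilterOk]
  | cons c t =>
    have h0 : check_three_runsStep [] c = [(c, 1)] := by simp [check_three_runsStep]
    rw [List.foldl_cons, h0, foldl_runs_inv t c 1 [] (by omega)]
    simp [allFilterOk]

-- ===== VERDICT (by name: the statement is the Claim_ definition above) =====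
theorem check_three_spec : Claim_equal_check_three := by
  intro password _
  unfold Spec_check_three check_three check_three_alt
  have h1 := loopA_eq_pairs password.toList password.toList 0 (by simp)
  have h2 := runsCheck_eq_pairs password.toList
  unfold allFilterOk at h2
  simp only [check_three_runs, List.filter_reverse, List.all_reverse]
  rw [h2]
  simpa using h1
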